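-- pv_equiv track=rewrite | github.com/aacohn84/advent_of_code_2020 | customs.py | marked_yes_by_all
-- ===== SOURCE A (Python) =====
-- def marked_yes_by_all(ans_group):
--     ans_sets = []
--     for ans in ans_group:
--         ans_set = set()
--         for c in ans:
--             ans_set.add(c)
--         ans_sets.append(ans_set)
--     all_yes = ans_sets[0].intersection(*ans_sets[1:])
--     return len(all_yes)
-- ===== SOURCE B (Python) =====
-- def marked_yes_by_all(ans_group):
--     rest = ans_group[1:]
--     return sum(1 for c in set(ans_group[0]) if all(c in ans for ans in rest))
-- ===== Notes on version B (the rewrite author's own statement) =====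
-- stated objective: simpler
-- what changed: Instead of materialising one set per person and folding set intersections, B dedupes only the first person's answers and counts, via a generator with all(), the characters contained in every remaining answer string; no further sets are built and the membership scan short-circuits.
import Mathlib
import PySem

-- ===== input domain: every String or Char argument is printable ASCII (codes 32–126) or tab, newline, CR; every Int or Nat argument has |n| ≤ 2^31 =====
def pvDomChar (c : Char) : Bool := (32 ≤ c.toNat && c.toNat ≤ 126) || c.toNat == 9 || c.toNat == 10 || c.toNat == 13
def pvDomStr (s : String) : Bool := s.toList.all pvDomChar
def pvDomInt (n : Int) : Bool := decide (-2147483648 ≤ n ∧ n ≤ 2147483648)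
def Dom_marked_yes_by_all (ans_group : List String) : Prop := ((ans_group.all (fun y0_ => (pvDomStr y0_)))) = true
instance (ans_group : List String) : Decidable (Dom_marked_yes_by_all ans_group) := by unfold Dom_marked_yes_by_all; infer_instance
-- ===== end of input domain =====

-- B dedupes only the first answer string and counts characters contained in every other
-- answer via membership tests, instead of building one set per person and folding
-- set intersections (objective: simpler).


-- ===== PORT A =====
def marked_yes_by_all (ans_group : List String) : Int :=
  -- ans_sets = []; for ans in ans_group: build ans_set by adding each char; append
  let ans_sets : List (PySem.Set Char) :=
    ans_group.foldl (fun acc ans =>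
      acc ++ [ans.toList.foldl (fun s c => PySem.Set.add s c) PySem.Set.empty]) []
  -- all_yes = ans_sets[0].intersection(*ans_sets[1:]); return len(all_yes)
  match ans_sets with
  | [] => 0  -- ans_sets[0] raises IndexError here; excluded by Pre_
  | s0 :: tl => PySem.Set.len (tl.foldl (fun acc t => PySem.Set.inter acc t) s0)

-- ===== PORT B =====
def marked_yes_by_all_alt (ans_group : List String) : Int :=
  let rest := PySem.List.slice ans_group (some 1)   -- ans_group[1:]
  match ans_group with
  | [] => 0  -- set(ans_group[0]) raises IndexError here; excluded by Pre_
  | first :: _ =>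
    -- sum(1 for c in set(ans_group[0]) if all(c in ans for ans in rest));
    -- c is a single char, so Python's 'c in ans' is exactly char membership
    ((PySem.Set.ofList first.toList).countP
      (fun c => rest.all (fun ans => ans.toList.contains c)) : Int)

-- ===== PRECONDITION & SPEC =====
-- A raises IndexError (ans_sets[0]) on the empty list; Pre_ excludes exactly that input.
def Pre_marked_yes_by_all (ans_group : List String) : Prop := ans_group ≠ []
instance (ans_group : List String) : Decidable (Pre_marked_yes_by_all ans_group) := by unfold Pre_marked_yes_by_all; infer_instance
def pvWitness_marked_yes_by_all : List String := ["abc", "cab"]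

def Spec_marked_yes_by_all (ans_group : List String) (out : Int) : Prop := out = marked_yes_by_all_alt ans_group
instance (ans_group : List String) (out : Int) : Decidable (Spec_marked_yes_by_all ans_group out) := by unfold Spec_marked_yes_by_all; infer_instance

-- ===== CLAIM (what is proved, stated in full; the proofs are below) =====
def Claim_equal_marked_yes_by_all : Prop := ∀ (ans_group : List String), Dom_marked_yes_by_all ans_group → Pre_marked_yes_by_all ans_group → Spec_marked_yes_by_all ans_group (marked_yes_by_all ans_group)

-- ===== LEMMAS AND PROOFS =====

-- folding Python set-intersection over a list of sets filters by membership in all of them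
theorem foldl_inter_eq_filter (ts : List (PySem.Set Char)) (s : PySem.Set Char) :
    ts.foldl (fun acc t => PySem.Set.inter acc t) s
      = s.filter (fun c => ts.all (fun t => PySem.Set.contains t c)) := by
  induction ts generalizing s with
  | nil => simp
  | cons t ts ih =>
      rw [List.foldl_cons, ih]
      simp only [PySem.Set.inter, List.filter_filter, List.all_cons]
      exact List.filter_congr (fun c _ => by simp [PySem.Set.contains, Bool.and_comm])

-- ===== VERDICT (by name: the statement is the Claim_ definition above) =====
theorem marked_yes_by_all_spec : Claim_equal_marked_yes_by_all := by
  intro ans_group _ hpre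
  cases ans_group with
  | nil => exact absurd rfl hpre
  | cons first rest =>
      show marked_yes_by_all (first :: rest) = marked_yes_by_all_alt (first :: rest)
      simp only [marked_yes_by_all, marked_yes_by_all_alt,
        PySem.List.foldl_append_singleton_eq_map, List.nil_append, List.map_cons,
        foldl_inter_eq_filter, PySem.List.slice_from (a := 1) _ (by norm_num)]
      rw [show ((1 : Int).toNat) = 1 from rfl, List.drop_one, List.tail_cons]
      rw [show (List.foldl (fun s c => PySem.Set.add s c) PySem.Set.empty first.toList)
            = PySem.Set.ofList first.toList from (PySem.Set.ofList_eq_foldl _).symm]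
      simp only [PySem.Set.len, List.countP_eq_length_filter.symm]
      congr 1
      apply List.countP_congr
      intro c _
      simp [PySem.Set.contains, List.all_map, ← PySem.Set.ofList_eq_foldl,
        PySem.Set.mem_ofList]
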